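-- pv_equiv track=rewrite | github.com/ninhcuong/BTL_PYTHON_boom | pyhon/So_Tang_Giam.py | check
-- ===== SOURCE A (Python) =====
-- def check(a):
--     kt=True
--     n=list("")
--     for i in a:
--          if i not in n:
--             n.append(i)
--
--     if(len(n)<3) : kt=False
--     check=0
--     for i in range (len(a)-1):
--         if(a[i]==a[i+1]):
--              kt=False
--         if(a[i]>a[i+1]) :
--             check=i
--             break
--     for i in range (check,len(a)-1,1):
--          if(a[i]<a[i+1]):
--              kt=False
--     return kt
-- ===== SOURCE B (Python) =====
-- def check(a):
--     # peak-finding decomposition: locate the first occurrence of the maximum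
--     # and verify strict ascent before it and non-increase after it
--     if len(set(a)) < 3:
--         return False
--     p = a.index(max(a))
--     if p == len(a) - 1:
--         return False
--     pre, post = a[:p + 1], a[p:]
--     return (a[p] > a[p + 1]
--             and all(x < y for x, y in zip(pre, pre[1:]))
--             and all(x >= y for x, y in zip(post, post[1:])))
-- ===== Notes on version B (the rewrite author's own statement) =====
-- stated objective: alternative
-- what changed: Instead of A's flag-driven index loops (quadratic hand-rolled dedup, break on first descent, rescan from the break index), B locates the peak directly as the first index of max(a) and verifies the shape by slicing: strict ascent on a[:p+1], non-increase on a[p:], a strict drop at p, plus len(set(a)) >= 3.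
import Mathlib
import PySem

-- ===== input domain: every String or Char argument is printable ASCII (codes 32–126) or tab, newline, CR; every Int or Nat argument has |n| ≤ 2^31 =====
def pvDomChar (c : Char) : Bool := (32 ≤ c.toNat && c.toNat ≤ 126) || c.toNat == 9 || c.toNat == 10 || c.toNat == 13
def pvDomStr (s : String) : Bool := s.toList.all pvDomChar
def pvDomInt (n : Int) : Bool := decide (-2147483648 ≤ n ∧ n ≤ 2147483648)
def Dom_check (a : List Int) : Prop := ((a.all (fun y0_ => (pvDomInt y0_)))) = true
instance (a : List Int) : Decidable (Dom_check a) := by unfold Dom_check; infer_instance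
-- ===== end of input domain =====

-- B replaces A's flag-driven index loops by a peak-finding decomposition (first index of the maximum, then shape checks on the two slices); objective: a genuinely different algorithm, with the quadratic hand-rolled dedup replaced by a set.

-- ===== PORT A =====
-- second loop: 'for i in range(len(a)-1)' with a break on the first strict descent;
-- returns the final kt and the value of 'check' (break index, or 0 if no break).
-- a[i] is always in range here, so pyGetD with default 0 is exact.
def checkLoop2 (a : List Int) : List Int → Bool → Bool × Int
  | [], kt => (kt, 0)
  | i :: rest, kt =>
      let kt := if PySem.List.pyGetD a i 0 == PySem.List.pyGetD a (i + 1) 0 then false else kt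
      if PySem.List.pyGetD a i 0 > PySem.List.pyGetD a (i + 1) 0 then (kt, i)
      else checkLoop2 a rest kt

-- third loop: 'for i in range(check, len(a)-1, 1)'
def checkLoop3 (a : List Int) : List Int → Bool → Bool
  | [], kt => kt
  | i :: rest, kt =>
      checkLoop3 a rest
        (if PySem.List.pyGetD a i 0 < PySem.List.pyGetD a (i + 1) 0 then false else kt)

def check (a : List Int) : Bool :=
  let n : List Int := a.foldl (fun n i => if n.contains i then n else n ++ [i]) []
  let kt : Bool := if n.length < 3 then false else true
  let r2 := checkLoop2 a (PySem.List.pyRange 0 ((a.length : Int) - 1) 1) kt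
  checkLoop3 a (PySem.List.pyRange r2.2 ((a.length : Int) - 1) 1) r2.1

-- ===== PORT B =====
-- p = a.index(max(a)); then the three shape checks on the slices a[:p+1] and a[p:].
-- max?/index? return none only on the empty list, unreachable after the set-size
-- guard; the 'false' arms transcribe that unreachability.
def check_alt (a : List Int) : Bool :=
  if (PySem.Set.ofList a).length < 3 then false
  else
    match PySem.List.max? a (fun x => x) with
    | none => false
    | some m =>
      match PySem.List.index? a m with
      | none => false
      | some p =>
        if p = a.length - 1 then false
        else
          let pre := PySem.List.slice a none (some ((p : Int) + 1))
          let post := PySem.List.slice a (some (p : Int)) none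
          decide (PySem.List.pyGetD a (p : Int) 0 > PySem.List.pyGetD a ((p : Int) + 1) 0)
          && (pre.zip pre.tail).all (fun q => decide (q.1 < q.2))
          && (post.zip post.tail).all (fun q => decide (q.2 ≤ q.1))

-- ===== PRECONDITION & SPEC =====
def Spec_check (a : List Int) (out : Bool) : Prop := out = check_alt a
instance (a : List Int) (out : Bool) : Decidable (Spec_check a out) := by unfold Spec_check; infer_instance

-- ===== CLAIM (what is proved, stated in full; the proofs are below) =====
def Claim_equal_check : Prop := ∀ (a : List Int), Dom_check a → Spec_check a (check a)

-- ===== LEMMAS AND PROOFS =====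

-- pairs of adjacent elements starting at index k (proof-only helper)
def pvPairs (a : List Int) (k : Nat) : List (Int × Int) := (a.drop k).zip (a.drop (k + 1))

-- the common single-pass state machine both ports are reduced to (proof-only)
def pvScan : List (Int × Int) → Bool → Bool
  | [], desc => desc
  | (x, y) :: rest, desc =>
      if !desc then
        if x == y then false
        else if x > y then pvScan rest true
        else pvScan rest false
      else if x < y then false
      else pvScan rest desc

lemma pvPairs_nil (a : List Int) (k : Nat) (h : a.length ≤ k + 1) : pvPairs a k = [] := by
  unfold pvPairs
  rw [List.drop_eq_nil_of_le h]
  simp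

lemma pvPairs_cons (a : List Int) (k : Nat) (h : k + 1 < a.length) :
    pvPairs a k = (a[k], a[k + 1]) :: pvPairs a (k + 1) := by
  unfold pvPairs
  rw [List.drop_eq_getElem_cons (by omega : k < a.length),
      List.drop_eq_getElem_cons (h : k + 1 < a.length)]
  rfl

lemma pvGet (a : List Int) (k : Nat) (h : k < a.length) :
    PySem.List.pyGetD a (k : Int) 0 = a[k] := by
  rw [PySem.List.pyGetD_eq_getElem a 0 (by positivity) (by exact_mod_cast h)]
  simp

-- loop3 from index k = the descending phase of the state machine over the remaining pairs
lemma pvL3 (a : List Int) : ∀ (n k : Nat) (kt : Bool), a.length - k ≤ n →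
    checkLoop3 a (PySem.List.pyRange (k : Int) ((a.length : Int) - 1) 1) kt
      = (kt && pvScan (pvPairs a k) true) := by
  intro n
  induction n with
  | zero =>
    intro k kt h
    rw [PySem.List.pyRange_one_eq_nil (by omega), pvPairs_nil a k (by omega)]
    simp [checkLoop3, pvScan]
  | succ n ih =>
    intro k kt h
    by_cases hk : k + 1 < a.length
    · rw [PySem.List.pyRange_one_cons (by exact_mod_cast (by omega : (k : Int) < (a.length : Int) - 1))]
      show checkLoop3 a (((k : Nat) : Int) :: _) kt = _
      rw [checkLoop3]
      have hc : ((k : Int) + 1) = ((k + 1 : Nat) : Int) := by push_cast; ring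
      rw [hc, pvGet a k (by omega), pvGet a (k + 1) hk,
          ih (k + 1) _ (by omega), pvPairs_cons a k hk, pvScan]
      by_cases hlt : a[k] < a[k + 1] <;> simp [hlt]
    · rw [PySem.List.pyRange_one_eq_nil (by omega), pvPairs_nil a k (by omega)]
      simp [checkLoop3, pvScan]

def pvHasDesc (l : List (Int × Int)) : Bool := l.any (fun p => p.1 > p.2)
def pvNoEq (l : List (Int × Int)) : Bool := l.all (fun p => !(p.1 == p.2))

-- descent case: loop2 (with break) followed by loop3 = the single-pass state machine
lemma pvM (a : List Int) : ∀ (n k : Nat) (kt : Bool), a.length - k ≤ n →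
    pvHasDesc (pvPairs a k) = true →
    (checkLoop3 a
      (PySem.List.pyRange (checkLoop2 a (PySem.List.pyRange (k : Int) ((a.length : Int) - 1) 1) kt).2
        ((a.length : Int) - 1) 1)
      (checkLoop2 a (PySem.List.pyRange (k : Int) ((a.length : Int) - 1) 1) kt).1)
      = (kt && pvScan (pvPairs a k) false) := by
  intro n
  induction n with
  | zero =>
    intro k kt h hd
    rw [pvPairs_nil a k (by omega)] at hd
    simp [pvHasDesc] at hd
  | succ n ih =>
    intro k kt h hd
    by_cases hk : k + 1 < a.length
    · rw [pvPairs_cons a k hk] at hd ⊢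
      have hr : PySem.List.pyRange (k : Int) ((a.length : Int) - 1) 1
          = (k : Int) :: PySem.List.pyRange ((k : Int) + 1) ((a.length : Int) - 1) 1 :=
        PySem.List.pyRange_one_cons (by exact_mod_cast (by omega : (k : Int) < (a.length : Int) - 1))
      rw [hr, checkLoop2]
      have hc : ((k : Int) + 1) = ((k + 1 : Nat) : Int) := by push_cast; ring
      rw [hc, pvGet a k (by omega), pvGet a (k + 1) hk]
      rcases lt_trichotomy a[k] a[k + 1] with hlt | heq | hgt
      · -- strict rise: no eq flag, no break, recurse
        have h1 : (a[k] == a[k + 1]) = false := by simp; omega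
        have h2 : ¬ a[k] > a[k + 1] := by omega
        simp only [h1, Bool.false_eq_true, if_false, if_neg h2]
        rw [ih (k + 1) kt (by omega)
            (by simpa [pvHasDesc, h2] using hd), pvScan]
        simp [h1, h2]
      · -- plateau: kt := false, no break, recurse with kt = false
        have h1 : (a[k] == a[k + 1]) = true := by simp [heq]
        have h2 : ¬ a[k] > a[k + 1] := by omega
        simp only [h1, if_true, if_neg h2]
        rw [ih (k + 1) false (by omega)
            (by simpa [pvHasDesc, h2] using hd), pvScan]
        simp [h1]
      · -- strict descent: break at k, then loop3 from k
        have h1 : (a[k] == a[k + 1]) = false := by simp; omega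
        have h2 : a[k] > a[k + 1] := hgt
        simp only [h1, Bool.false_eq_true, if_false, if_pos h2]
        rw [pvL3 a (a.length - k) k kt (by omega), pvPairs_cons a k hk, pvScan, pvScan]
        have h3 : ¬ a[k] < a[k + 1] := by omega
        simp [h1, h2, h3]
    · rw [pvPairs_nil a k (by omega)] at hd
      simp [pvHasDesc] at hd

-- no-descent case: loop2 never breaks, flags every plateau, leaves check = 0
lemma pvN (a : List Int) : ∀ (n k : Nat) (kt : Bool), a.length - k ≤ n →
    pvHasDesc (pvPairs a k) = false →
    checkLoop2 a (PySem.List.pyRange (k : Int) ((a.length : Int) - 1) 1) kt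
      = (kt && pvNoEq (pvPairs a k), 0) := by
  intro n
  induction n with
  | zero =>
    intro k kt h hd
    rw [PySem.List.pyRange_one_eq_nil (by omega), pvPairs_nil a k (by omega)]
    simp [checkLoop2, pvNoEq]
  | succ n ih =>
    intro k kt h hd
    by_cases hk : k + 1 < a.length
    · rw [pvPairs_cons a k hk] at hd ⊢
      rw [PySem.List.pyRange_one_cons (by exact_mod_cast (by omega : (k : Int) < (a.length : Int) - 1)),
          checkLoop2]
      have hc : ((k : Int) + 1) = ((k + 1 : Nat) : Int) := by push_cast; ring
      rw [hc, pvGet a k (by omega), pvGet a (k + 1) hk]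
      have h2 : ¬ a[k] > a[k + 1] := by
        intro hgt
        simp [pvHasDesc] at hd
        omega
      rw [if_neg h2, ih (k + 1) _ (by omega) (by simpa [pvHasDesc, h2] using hd)]
      by_cases heq : a[k] = a[k + 1]
      · simp [pvNoEq, heq]
      · have hb : (a[k] == a[k + 1]) = false := by simp [heq]
        simp [pvNoEq, hb]
    · rw [PySem.List.pyRange_one_eq_nil (by omega), pvPairs_nil a k (by omega)]
      simp [checkLoop2, pvNoEq]

lemma pvQ : ∀ l : List (Int × Int), pvHasDesc l = false → pvScan l false = false := by
  intro l
  induction l with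
  | nil => intro _; rfl
  | cons p rest ih =>
    intro hd
    obtain ⟨x, y⟩ := p
    have h2 : ¬ x > y := by intro h; simp [pvHasDesc] at hd; omega
    rw [pvScan]
    by_cases heq : x = y
    · simp [heq]
    · simp only [show (x == y) = false by simp [heq], if_neg h2]
      simp only [Bool.not_false, if_true, Bool.false_eq_true, if_false]
      exact ih (by simpa [pvHasDesc, h2] using hd)

lemma pvSetLen : ∀ (a : List Int) (s : PySem.Set Int),
    (a.foldl PySem.Set.add s).length ≤ s.length + a.length := by
  intro a
  induction a with
  | nil => intro s; simp
  | cons x rest ih =>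
    intro s
    have hadd : (PySem.Set.add s x).length ≤ s.length + 1 := by
      simp [PySem.Set.add]
      split <;> simp
    calc ((x :: rest).foldl PySem.Set.add s).length
        = (rest.foldl PySem.Set.add (PySem.Set.add s x)).length := rfl
      _ ≤ (PySem.Set.add s x).length + rest.length := ih _
      _ ≤ s.length + (x :: rest).length := by simp; omega

-- A reduced to the state machine
lemma pvAred (a : List Int) :
    check a = ((!decide ((PySem.Set.ofList a).length < 3)) && pvScan (pvPairs a 0) false) := by
  unfold check
  have hfold : a.foldl (fun n i => if n.contains i then n else n ++ [i]) [] = PySem.Set.ofList a := rfl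
  rw [hfold]
  by_cases hlen : (PySem.Set.ofList a).length < 3
  · simp only [if_pos hlen, decide_eq_true hlen, Bool.not_true, Bool.false_and]
    by_cases hd : pvHasDesc (pvPairs a 0) = true
    · have := pvM a a.length 0 false (by omega) hd
      simpa using this
    · have h2 := pvN a a.length 0 false (by omega) (by simpa using hd)
      simp only [Nat.cast_zero] at h2
      rw [h2]
      have := pvL3 a a.length 0 false (by omega)
      simpa using this
  · simp only [if_neg hlen, decide_eq_false hlen, Bool.not_false, Bool.true_and]
    by_cases hd : pvHasDesc (pvPairs a 0) = true
    · have := pvM a a.length 0 true (by omega) hd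
      simpa using this
    · have hdf : pvHasDesc (pvPairs a 0) = false := by simpa using hd
      have h2 := pvN a a.length 0 true (by omega) hdf
      simp only [Nat.cast_zero] at h2
      rw [h2]
      have h3 := pvL3 a a.length 0 (true && pvNoEq (pvPairs a 0)) (by omega)
      simp only [Nat.cast_zero] at h3
      rw [h3, pvQ _ hdf]
      have hlen3 : 3 ≤ a.length := by
        have hsl := pvSetLen a (PySem.Set.empty)
        have h0 : (PySem.Set.empty : PySem.Set Int).length = 0 := rfl
        have hof : PySem.Set.ofList a = a.foldl PySem.Set.add PySem.Set.empty := rfl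
        rw [hof] at hlen
        omega
      have hk : 0 + 1 < a.length := by omega
      rw [pvPairs_cons a 0 hk] at *
      rcases lt_trichotomy a[0] a[1] with hlt | heq | hgt
      · rw [pvScan]
        simp [hlt]
      · simp [pvNoEq, heq]
      · simp [pvHasDesc, hgt] at hdf

-- the "mountain at p" shape, stated over getD
def pvShape (a : List Int) (k : Nat) : Prop :=
  ∃ p, k ≤ p ∧ p + 1 < a.length ∧
    (∀ i, k ≤ i → i < p → a.getD i 0 < a.getD (i + 1) 0) ∧
    a.getD (p + 1) 0 < a.getD p 0 ∧
    (∀ i, p < i → i + 1 < a.length → a.getD (i + 1) 0 ≤ a.getD i 0)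

-- desc phase of the state machine = all remaining pairs non-increasing
lemma pvScanTrue : ∀ l : List (Int × Int), pvScan l true = l.all (fun q => decide (q.2 ≤ q.1)) := by
  intro l
  induction l with
  | nil => rfl
  | cons q rest ih =>
    obtain ⟨x, y⟩ := q
    rw [pvScan]
    by_cases h : x < y
    · simp [h, show ¬ y ≤ x by omega]
    · simp [h, show y ≤ x by omega, ih]

lemma pvPairs_all_iff (a : List Int) (k : Nat) (f : Int → Int → Bool) :
    (pvPairs a k).all (fun q => f q.1 q.2) = true ↔
      ∀ i, k ≤ i → i + 1 < a.length → f (a.getD i 0) (a.getD (i + 1) 0) = true := by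
  induction hn : a.length - k using Nat.strong_induction_on generalizing k with
  | _ n ih =>
  by_cases hk : k + 1 < a.length
  · rw [pvPairs_cons a k hk, List.all_cons]
    have h1 : a.getD k 0 = a[k] := List.getD_eq_getElem a 0 (by omega)
    have h2 : a.getD (k + 1) 0 = a[k + 1] := List.getD_eq_getElem a 0 hk
    rw [Bool.and_eq_true, ih (a.length - (k + 1)) (by omega) (k + 1) rfl]
    constructor
    · rintro ⟨hf, hrest⟩ i hki hi
      rcases Nat.eq_or_lt_of_le hki with h | h
      · subst h; rw [h1, h2]; exact hf
      · exact hrest i h hi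
    · intro h
      refine ⟨?_, fun i hi hii => h i (by omega) hii⟩
      have hk' := h k le_rfl hk
      rw [h1, h2] at hk'
      simpa using hk'
  · rw [pvPairs_nil a k (by omega)]
    simp only [List.all_nil, true_iff]
    intro i hki hi; omega
lemma pvScanFalse_iff (a : List Int) (k : Nat) :
    pvScan (pvPairs a k) false = true ↔ pvShape a k := by
  induction hn : a.length - k using Nat.strong_induction_on generalizing k with
  | _ n ih =>
  by_cases hk : k + 1 < a.length
  · rw [pvPairs_cons a k hk, pvScan]
    have h1 : a.getD k 0 = a[k] := List.getD_eq_getElem a 0 (by omega)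
    have h2 : a.getD (k + 1) 0 = a[k + 1] := List.getD_eq_getElem a 0 hk
    rcases lt_trichotomy a[k] a[k + 1] with hlt | heq | hgt
    · -- rise: recurse with shape from k+1
      have hne : (a[k] == a[k + 1]) = false := by simp; omega
      simp only [Bool.not_false, if_true, hne, Bool.false_eq_true, if_false,
        if_neg (show ¬ a[k] > a[k + 1] by omega)]
      rw [ih (a.length - (k + 1)) (by omega) (k + 1) rfl]
      constructor
      · rintro ⟨p, hp1, hp2, hasc, hdrop, hdesc⟩
        refine ⟨p, by omega, hp2, ?_, hdrop, hdesc⟩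
        intro i hki hip
        rcases Nat.eq_or_lt_of_le hki with h | h
        · subst h; rw [h1, h2]; exact hlt
        · exact hasc i h hip
      · rintro ⟨p, hp1, hp2, hasc, hdrop, hdesc⟩
        have hpk : k ≠ p := by
          intro h; subst h
          rw [h1, h2] at hdrop; omega
        exact ⟨p, by omega, hp2, fun i hi hip => hasc i (by omega) hip, hdrop, hdesc⟩
    · -- plateau before any descent: both sides false
      have heqb : (a[k] == a[k + 1]) = true := by simp [heq]
      simp only [Bool.not_false, if_true, heqb, Bool.false_eq_true, false_iff]
      rintro ⟨p, hp1, hp2, hasc, hdrop, hdesc⟩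
      rcases Nat.eq_or_lt_of_le hp1 with h | h
      · subst h; rw [h1, h2] at hdrop; omega
      · have := hasc k le_rfl h; rw [h1, h2] at this; omega
    · -- drop at k: desc phase over the rest
      have hne : (a[k] == a[k + 1]) = false := by simp; omega
      simp only [Bool.not_false, if_true, hne, Bool.false_eq_true, if_false, if_pos hgt]
      rw [pvScanTrue, pvPairs_all_iff a (k + 1) (fun x y => decide (y ≤ x))]
      constructor
      · intro h
        refine ⟨k, le_rfl, hk, fun i hi hip => by omega, by rw [h1, h2]; exact hgt, ?_⟩
        intro i hki hii
        have := h i (by omega) hii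
        simpa using this
      · rintro ⟨p, hp1, hp2, hasc, hdrop, hdesc⟩ i hki hii
        have hpk : p = k := by
          by_contra hne2
          have := hasc k le_rfl (by omega)
          rw [h1, h2] at this; omega
        subst hpk
        simp only [decide_eq_true_eq]
        exact hdesc i (by omega) hii
  · rw [pvPairs_nil a k (by omega)]
    simp only [pvScan, Bool.false_eq_true, false_iff]
    rintro ⟨p, hp1, hp2, _⟩
    omega

-- ascent chains
lemma pvAscLt (a : List Int) (p : Nat) (hasc : ∀ i, i < p → a.getD i 0 < a.getD (i + 1) 0) :
    ∀ j, j ≤ p → ∀ i, i < j → a.getD i 0 < a.getD j 0 := by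
  intro j
  induction j with
  | zero => intro _ i hi; omega
  | succ j ih =>
    intro hj i hi
    have hstep := hasc j (by omega)
    rcases Nat.lt_succ_iff_lt_or_eq.mp hi with h | h
    · exact lt_trans (ih (by omega) i h) hstep
    · subst h; exact hstep

lemma pvDescLe (a : List Int) (p : Nat) (hdesc : ∀ i, p < i → i + 1 < a.length → a.getD (i + 1) 0 ≤ a.getD i 0) :
    ∀ j, j < a.length → p + 1 ≤ j → a.getD j 0 ≤ a.getD (p + 1) 0 := by
  intro j
  induction j with
  | zero => intro _ h; omega
  | succ j ih =>
    intro hj hpj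
    rcases Nat.lt_or_ge (p + 1) (j + 1) with h | h
    · exact le_trans (hdesc j (by omega) hj) (ih (by omega) (by omega))
    · have : p + 1 = j + 1 := by omega
      rw [this]

-- under pvShape at p, a[p] is the strict maximum
lemma pvShapeMax (a : List Int) (p : Nat) (_hp : p + 1 < a.length)
    (hasc : ∀ i, i < p → a.getD i 0 < a.getD (i + 1) 0)
    (hdrop : a.getD (p + 1) 0 < a.getD p 0)
    (hdesc : ∀ i, p < i → i + 1 < a.length → a.getD (i + 1) 0 ≤ a.getD i 0) :
    ∀ j, j < a.length → j ≠ p → a.getD j 0 < a.getD p 0 := by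
  intro j hj hne
  rcases Nat.lt_or_ge j p with h | h
  · exact pvAscLt a p hasc p le_rfl j h
  · have hj1 : p + 1 ≤ j := by omega
    exact lt_of_le_of_lt (pvDescLe a p hdesc j hj hj1) hdrop

-- B reduced to the state machine
lemma pvBred (a : List Int) :
    check_alt a = ((!decide ((PySem.Set.ofList a).length < 3)) && pvScan (pvPairs a 0) false) := by
  unfold check_alt
  by_cases hlen : (PySem.Set.ofList a).length < 3
  · simp [hlen]
  · simp only [if_neg hlen, decide_eq_false hlen, Bool.not_false, Bool.true_and]
    have hlen3 : 3 ≤ a.length := by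
      have hsl := pvSetLen a (PySem.Set.empty)
      have hof : PySem.Set.ofList a = a.foldl PySem.Set.add PySem.Set.empty := rfl
      rw [hof] at hlen
      have h0 : (PySem.Set.empty : PySem.Set Int).length = 0 := rfl
      omega
    have hne : a ≠ [] := by intro h; subst h; simp at hlen3
    obtain ⟨m, hm⟩ := Option.ne_none_iff_exists'.mp
      (fun h => hne ((PySem.List.max?_eq_none_iff a (fun x => x)).mp h))
    simp only [hm]
    have hmem : m ∈ a := PySem.List.max?_mem hm
    obtain ⟨p, hp⟩ := Option.ne_none_iff_exists'.mp
      (fun h => (PySem.List.index?_eq_none_iff a m).mp h hmem)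
    simp only [hp]
    obtain ⟨hplen, hap, hfirst⟩ := PySem.List.getElem_of_index?_eq_some hp
    have hmax : ∀ y ∈ a, y ≤ m := fun y hy => PySem.List.max?_isMax hm y hy
    by_cases hlast : p = a.length - 1
    · -- p is the last index: B returns false; show no shape (a[p] is weak max, first occurrence)
      simp only [if_pos hlast, Eq.symm]
      symm
      rw [Bool.eq_false_iff]
      intro hscan
      obtain ⟨q, _, hq2, hasc, hdrop, hdesc⟩ := (pvScanFalse_iff a 0).mp hscan
      -- a[q] is the strict max, so m = a[q] and first index of m is q < len-1 = p
      have hqlen : q < a.length := by omega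
      have hqm : ∀ j, j < a.length → j ≠ q → a.getD j 0 < a.getD q 0 :=
        pvShapeMax a q hq2 (fun i hi => hasc i (by omega) hi) hdrop hdesc
      have hqp : q ≠ p := by omega
      have h1 : a.getD p 0 < a.getD q 0 := hqm p (by omega) (by omega)
      have h2 : a.getD q 0 ≤ m := by
        have := hmax (a.getD q 0) (by rw [List.getD_eq_getElem a 0 hqlen]; exact a.getElem_mem hqlen)
        exact this
      rw [List.getD_eq_getElem a 0 (by omega : p < a.length), hap] at h1
      omega
    · simp only [if_neg hlast]
      -- both sides as shape
      rw [Bool.eq_iff_iff]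
      have hplt : p + 1 < a.length := by omega
      have hgp : a.getD p 0 = m := by rw [List.getD_eq_getElem a 0 hplen, hap]
      have hpreg : PySem.List.slice a none (some ((p : Int) + 1)) = a.take (p + 1) := by
        have : ((p : Int) + 1) = ((p + 1 : Nat) : Int) := by push_cast; ring
        rw [this, PySem.List.slice_to_natCast]
      have hpostg : PySem.List.slice a (some (p : Int)) none = a.drop p :=
        PySem.List.slice_from_natCast a p
      rw [hpreg, hpostg, pvGet a p hplen,
        show ((p : Int) + 1) = ((p + 1 : Nat) : Int) by push_cast; ring, pvGet a (p + 1) hplt]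
      have hpre : (a.take (p + 1)).zip (a.take (p + 1)).tail = pvPairs (a.take (p + 1)) 0 := by
        unfold pvPairs; cases a.take (p + 1) <;> rfl
      have hpost : (a.drop p).zip (a.drop p).tail = pvPairs (a.drop p) 0 := by
        unfold pvPairs; cases a.drop p <;> rfl
      rw [hpre, hpost, Bool.and_assoc, Bool.and_eq_true, Bool.and_eq_true, decide_eq_true_eq,
        pvPairs_all_iff (a.take (p + 1)) 0 (fun x y => decide (x < y)),
        pvPairs_all_iff (a.drop p) 0 (fun x y => decide (y ≤ x)),
        pvScanFalse_iff a 0]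
      have hgtake : ∀ i, i < p + 1 → (a.take (p + 1)).getD i 0 = a.getD i 0 := by
        intro i hi
        rw [List.getD_eq_getElem _ 0 (by simp; omega), List.getD_eq_getElem a 0 (by omega),
          List.getElem_take]
      have hgdrop : ∀ i, p + i < a.length → (a.drop p).getD i 0 = a.getD (p + i) 0 := by
        intro i hi
        rw [List.getD_eq_getElem _ 0 (by simp; omega), List.getD_eq_getElem a 0 hi,
          List.getElem_drop]
      constructor
      · rintro ⟨hdrop, hascB, hdescB⟩
        refine ⟨p, by omega, hplt, ?_, ?_, ?_⟩
        · intro i _ hip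
          have := hascB i (by omega) (by simp; omega)
          rw [hgtake i (by omega), hgtake (i + 1) (by omega)] at this
          simpa using this
        · rw [List.getD_eq_getElem a 0 hplt, List.getD_eq_getElem a 0 hplen]; omega
        · intro i hpi hii
          have := hdescB (i - p) (by omega) (by simp; omega)
          rw [hgdrop (i - p) (by omega), hgdrop (i - p + 1) (by omega),
            show p + (i - p) = i by omega, show p + (i - p + 1) = i + 1 by omega] at this
          simpa using this
      · rintro ⟨q, _, hq2, hasc, hdropq, hdesc⟩
        -- first: q = p since a[q] is the strict max and p is the first index of m
        have hqm : ∀ j, j < a.length → j ≠ q → a.getD j 0 < a.getD q 0 :=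
          pvShapeMax a q hq2 (fun i hi => hasc i (by omega) hi) hdropq hdesc
        have hmq : m = a.getD q 0 := by
          have h2 : a.getD q 0 ≤ m := hmax _ (by
            rw [List.getD_eq_getElem a 0 (by omega : q < a.length)]; exact a.getElem_mem _)
          by_cases hpq : p = q
          · rw [← hpq, hgp]
          · have := hqm p (by omega) hpq
            rw [hgp] at this; omega
        have hqp : q = p := by
          by_contra hqpne
          have hqlt : q < p := by
            by_contra hge
            have hlt := hqm p (by omega) (by omega)
            rw [hgp, ← hmq] at hlt
            omega
          exact hfirst q hqlt
            (by rw [← List.getD_eq_getElem a 0 (by omega : q < a.length), ← hmq])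
        subst hqp
        refine ⟨?_, ?_, ?_⟩
        · rw [List.getD_eq_getElem a 0 hplt, List.getD_eq_getElem a 0 hplen] at hdropq; omega
        · intro i _ hii
          simp only [List.length_take] at hii
          have hip : i < q := by omega
          rw [hgtake i (by omega), hgtake (i + 1) (by omega)]
          simpa using hasc i (by omega) hip
        · intro i _ hii
          simp only [List.length_drop] at hii
          rw [hgdrop i (by omega), hgdrop (i + 1) (by omega)]
          simp only [decide_eq_true_eq]
          rcases Nat.eq_zero_or_pos i with h0 | h0
          · subst h0
            simp only [Nat.add_zero]
            rw [List.getD_eq_getElem a 0 hplt, List.getD_eq_getElem a 0 hplen] at hdropq ⊢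
            omega
          · have := hdesc (q + i) (by omega) (by omega)
            rw [show q + i + 1 = q + (i + 1) by omega] at this
            exact this

-- ===== VERDICT (by name: the statement is the Claim_ definition above) =====
theorem check_spec : Claim_equal_check := by
  intro a _
  unfold Spec_check
  rw [pvAred, pvBred]
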